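-- pv_equiv track=rewrite | github.com/haritsE/fp-dataset-artifacts | attack.py | categorize_wh_from_row
-- ===== SOURCE A (Python) =====
-- def categorize_wh_from_row(row: dict) -> str:
--   wh_words = ['why', 'who', 'when', 'where']
--   for wh_word in wh_words:
--     if row['question'].startswith(wh_word):
--       return wh_word
--
--   # doesn't start with wh* words, then whatever is inside
--   for wh_word in wh_words:
--     if wh_word in row['question']:
--       return wh_word
--
--   # no wh* words at all, return None
--   return None
-- ===== SOURCE B (Python) =====
-- def categorize_wh_from_row(row: dict) -> str:
--   wh_words = ['why', 'who', 'when', 'where']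
--   q = row['question']
--   candidate = None
--   for wh_word in wh_words:
--     if q.startswith(wh_word):
--       return wh_word
--     if candidate is None and wh_word in q:
--       candidate = wh_word
--   return candidate
-- ===== Notes on version B (the rewrite author's own statement) =====
-- stated objective: alternative
-- what changed: Merges A's two sequential scans over wh_words into a single pass that returns on a prefix match and maintains a first contains-match fallback candidate, reading row['question'] once.
import Mathlib
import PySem

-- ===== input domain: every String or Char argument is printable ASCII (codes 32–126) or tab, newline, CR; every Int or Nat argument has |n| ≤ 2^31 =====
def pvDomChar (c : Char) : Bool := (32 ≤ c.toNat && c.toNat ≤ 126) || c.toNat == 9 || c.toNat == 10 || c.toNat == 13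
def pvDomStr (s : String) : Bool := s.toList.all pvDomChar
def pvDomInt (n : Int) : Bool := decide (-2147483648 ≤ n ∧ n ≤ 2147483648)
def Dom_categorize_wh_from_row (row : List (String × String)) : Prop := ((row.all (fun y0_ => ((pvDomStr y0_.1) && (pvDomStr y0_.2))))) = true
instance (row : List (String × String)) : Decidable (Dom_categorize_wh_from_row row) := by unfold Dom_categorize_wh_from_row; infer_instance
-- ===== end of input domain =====

-- B merges A's two scans into one pass with a fallback candidate; A's row['question'] raises KeyError when the key is absent, so Pre_ requires it.

-- ===== PORT A =====
-- first loop: return the first wh_word that row['question'] starts with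
-- second loop: return the first wh_word contained in row['question']
def categorize_wh_from_row (row : List (String × String)) : Option String :=
  let wh_words := ["why", "who", "when", "where"]
  match (PySem.Dict.mk row).get? "question" with
  | none => none  -- KeyError in Python; excluded by Pre_
  | some q =>
    match wh_words.find? (fun w => PySem.Str.startswith q w) with
    | some w => some w
    | none => wh_words.find? (fun w => PySem.Str.isIn w q)

-- ===== PORT B =====
-- single pass: early return on startswith, record first contains-match as candidate
def pvAltLoop (q : String) (ws : List String) (candidate : Option String) : Option String :=
  match ws with
  | [] => candidate
  | w :: rest =>
    if PySem.Str.startswith q w then some w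
    else pvAltLoop q rest
      (if candidate.isNone && PySem.Str.isIn w q then some w else candidate)

def categorize_wh_from_row_alt (row : List (String × String)) : Option String :=
  match (PySem.Dict.mk row).get? "question" with
  | none => none
  | some q => pvAltLoop q ["why", "who", "when", "where"] none

-- ===== PRECONDITION & SPEC =====
-- Pre_: A raises KeyError when row has no 'question' key
def Pre_categorize_wh_from_row (row : List (String × String)) : Prop :=
  (PySem.Dict.mk row).contains "question" = true
instance (row : List (String × String)) : Decidable (Pre_categorize_wh_from_row row) := by
  unfold Pre_categorize_wh_from_row; infer_instance
def pvWitness_categorize_wh_from_row : (List (String × String)) := [("question", "who is it")]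
def Spec_categorize_wh_from_row (row : List (String × String)) (out : Option String) : Prop := out = categorize_wh_from_row_alt row
instance (row : List (String × String)) (out : Option String) : Decidable (Spec_categorize_wh_from_row row out) := by unfold Spec_categorize_wh_from_row; infer_instance

-- ===== CLAIM (what is proved, stated in full; the proofs are below) =====
def Claim_equal_categorize_wh_from_row : Prop := ∀ (row : List (String × String)), Dom_categorize_wh_from_row row → Pre_categorize_wh_from_row row → Spec_categorize_wh_from_row row (categorize_wh_from_row row)

-- ===== LEMMAS AND PROOFS =====
lemma bodies_eq (q : String) :
    (match ["why", "who", "when", "where"].find? (fun w => PySem.Str.startswith q w) with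
     | some w => some w
     | none => ["why", "who", "when", "where"].find? (fun w => PySem.Str.isIn w q))
    = pvAltLoop q ["why", "who", "when", "where"] none := by
  simp only [pvAltLoop, List.find?]
  cases h1 : PySem.Str.startswith q "why" <;>
  cases h2 : PySem.Str.startswith q "who" <;>
  cases h3 : PySem.Str.startswith q "when" <;>
  cases h4 : PySem.Str.startswith q "where" <;>
  cases h5 : PySem.Str.isIn "why" q <;>
  cases h6 : PySem.Str.isIn "who" q <;>
  cases h7 : PySem.Str.isIn "when" q <;>
  simp [h1, h2, h3, h4, h5, h6, h7] <;> split <;> simp_all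

-- ===== VERDICT (by name: the statement is the Claim_ definition above) =====
theorem categorize_wh_from_row_spec : Claim_equal_categorize_wh_from_row := by
  intro row _ hpre
  unfold Spec_categorize_wh_from_row categorize_wh_from_row categorize_wh_from_row_alt
  cases hq : (PySem.Dict.mk row).get? "question" with
  | none => rfl
  | some q => exact bodies_eq q
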